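-- pv_equiv track=rewrite | github.com/seawnm/opentree | src/opentree/runner/thread_context.py | _truncate_to_limit
-- ===== SOURCE A (Python) =====
-- def _truncate_to_limit(messages: list[str], max_chars: int) -> list[str]:
--     """Truncate from the oldest messages until total chars <= max_chars.
--
--     Always preserves at least the last (newest) message even if it alone
--     exceeds ``max_chars``.
--     """
--     if not messages:
--         return []
--
--     # Fast path: already within limit
--     total = sum(len(m) for m in messages)
--     if total <= max_chars:
--         return list(messages)
--
--     # Drop from the oldest end until we fit, keeping at least 1 message
--     total = sum(len(m) for m in messages)
--     i = 0
--     while i < len(messages) - 1 and total > max_chars: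
--         total -= len(messages[i])
--         i += 1
--     return list(messages[i:])
-- ===== SOURCE B (Python) =====
-- def _truncate_to_limit(messages: list[str], max_chars: int) -> list[str]:
--     """Truncate from the oldest messages until total chars <= max_chars.
--
--     Single backward pass: always keep the newest message, then extend the
--     kept suffix with older messages while the running total stays within
--     the limit.
--     """
--     if not messages:
--         return []
--     rev = list(reversed(messages))
--     kept = [rev[0]]
--     acc = len(rev[0])
--     for m in rev[1:]:
--         if acc + len(m) > max_chars:
--             break
--         kept.append(m)
--         acc += len(m)
--     return list(reversed(kept))
-- ===== Notes on version B (the rewrite author's own statement) =====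
-- stated objective: simpler
-- what changed: Replaces A's compute-total-then-drop-from-front loop (two sum passes plus an index loop over the fixed list) by a single backward pass that accumulates lengths newest-first and stops as soon as an older message would overflow the limit.
import Mathlib
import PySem

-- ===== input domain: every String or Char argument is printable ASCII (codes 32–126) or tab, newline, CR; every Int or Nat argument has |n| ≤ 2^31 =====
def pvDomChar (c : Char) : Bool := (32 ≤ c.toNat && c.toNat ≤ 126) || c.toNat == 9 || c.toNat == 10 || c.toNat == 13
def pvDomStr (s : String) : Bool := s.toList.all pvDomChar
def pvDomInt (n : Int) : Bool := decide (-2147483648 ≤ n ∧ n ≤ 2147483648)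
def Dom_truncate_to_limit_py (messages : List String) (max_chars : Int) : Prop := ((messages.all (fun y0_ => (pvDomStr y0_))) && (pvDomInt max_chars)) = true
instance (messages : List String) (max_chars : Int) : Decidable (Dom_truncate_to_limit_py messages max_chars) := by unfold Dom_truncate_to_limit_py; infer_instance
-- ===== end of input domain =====

-- B replaces A's compute-total-then-drop-from-front structure by one backward pass
-- with a running accumulator (objective: simpler).

-- ===== PORT A =====
-- the while loop 'while i < len(messages) - 1 and total > max_chars: total -= len(messages[i]); i += 1'
def truncateALoop (messages : List String) (max_chars : Int) (i : Nat) (total : Int) : Nat :=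
  if i < messages.length - 1 ∧ total > max_chars then
    truncateALoop messages max_chars (i + 1) (total - PySem.Str.len (messages.getD i ""))
  else i
termination_by messages.length - 1 - i

def truncate_to_limit_py (messages : List String) (max_chars : Int) : List String :=
  if messages = [] then []
  else
    let total : Int := (messages.map PySem.Str.len).sum
    if total ≤ max_chars then messages
    else
      let total2 : Int := (messages.map PySem.Str.len).sum
      let i := truncateALoop messages max_chars 0 total2
      messages.drop i  -- messages[i:] with 0 ≤ i ≤ len

-- ===== PORT B =====
-- the for loop over rev[1:]: kept.append / acc update, break on overflow
def truncateBLoop (older : List String) (max_chars : Int) (acc : Int) (kept : List String) : List String :=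
  match older with
  | [] => kept
  | m :: rest =>
    if acc + PySem.Str.len m > max_chars then kept
    else truncateBLoop rest max_chars (acc + PySem.Str.len m) (kept ++ [m])

def truncate_to_limit_py_alt (messages : List String) (max_chars : Int) : List String :=
  match messages.reverse with
  | [] => []
  | newest :: older =>
    (truncateBLoop older max_chars (PySem.Str.len newest) [newest]).reverse

-- ===== PRECONDITION & SPEC =====
def Spec_truncate_to_limit_py (messages : List String) (max_chars : Int) (out : List String) : Prop := out = truncate_to_limit_py_alt messages max_chars
instance (messages : List String) (max_chars : Int) (out : List String) : Decidable (Spec_truncate_to_limit_py messages max_chars out) := by unfold Spec_truncate_to_limit_py; infer_instance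

-- ===== CLAIM (what is proved, stated in full; the proofs are below) =====
def Claim_equal_truncate_to_limit_py : Prop := ∀ (messages : List String) (max_chars : Int), Dom_truncate_to_limit_py messages max_chars → Spec_truncate_to_limit_py messages max_chars (truncate_to_limit_py messages max_chars)

-- ===== LEMMAS AND PROOFS =====

-- total length of a list of strings
def sumLen (l : List String) : Int := (l.map PySem.Str.len).sum

-- reference function both ports are reduced to: the longest suffix whose total
-- length fits, but never dropping the last message
def sFit (l : List String) (max_chars : Int) : List String :=
  match l with
  | [] => []
  | m :: rest =>
    if rest = [] then [m]
    else if sumLen (m :: rest) ≤ max_chars then m :: rest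
    else sFit rest max_chars

-- greedy take of the B-loop, without the kept accumulator
def twa (older : List String) (max_chars : Int) (acc : Int) : List String :=
  match older with
  | [] => []
  | m :: rest =>
    if acc + PySem.Str.len m > max_chars then []
    else m :: twa rest max_chars (acc + PySem.Str.len m)

theorem strLen_nonneg (s : String) : 0 ≤ PySem.Str.len s := by
  simp [PySem.Str.len_eq]

theorem sumLen_nonneg (l : List String) : 0 ≤ sumLen l := by
  induction l with
  | nil => simp [sumLen]
  | cons m rest ih =>
    simp only [sumLen, List.map_cons, List.sum_cons]
    have := strLen_nonneg m
    simp only [sumLen] at ih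
    omega

theorem sumLen_cons (m : String) (rest : List String) :
    sumLen (m :: rest) = PySem.Str.len m + sumLen rest := by
  simp [sumLen]

theorem sumLen_reverse (l : List String) : sumLen l.reverse = sumLen l := by
  simp [sumLen]

theorem twa_all (older : List String) (max_chars acc : Int)
    (h : acc + sumLen older ≤ max_chars) : twa older max_chars acc = older := by
  induction older generalizing acc with
  | nil => simp [twa]
  | cons m rest ih =>
    rw [sumLen_cons] at h
    have hr := sumLen_nonneg rest
    rw [twa, if_neg (by omega)]
    rw [ih (acc + PySem.Str.len m) (by omega)]

theorem twa_dead (older : List String) (max_chars acc : Int)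
    (h : max_chars < acc) : twa older max_chars acc = [] := by
  cases older with
  | nil => simp [twa]
  | cons m rest =>
    have := strLen_nonneg m
    rw [twa, if_pos (by omega)]

theorem twa_append (o o' : List String) (max_chars acc : Int) :
    twa (o ++ o') max_chars acc =
      if acc + sumLen o ≤ max_chars then o ++ twa o' max_chars (acc + sumLen o)
      else twa o max_chars acc := by
  induction o generalizing acc with
  | nil =>
    simp only [List.nil_append, sumLen, List.map_nil, List.sum_nil, add_zero]
    by_cases h : acc ≤ max_chars
    · rw [if_pos h]
    · rw [if_neg h, twa_dead o' max_chars acc (by omega)]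
      simp [twa]
  | cons m rest ih =>
    by_cases hm : acc + PySem.Str.len m > max_chars
    · have hr := sumLen_nonneg rest
      rw [sumLen_cons, List.cons_append, twa, if_pos hm, if_neg (by omega),
        twa, if_pos hm]
    · rw [List.cons_append, twa, if_neg hm, ih, sumLen_cons]
      by_cases h2 : acc + PySem.Str.len m + sumLen rest ≤ max_chars
      · rw [if_pos h2, if_pos (by omega)]
        simp [add_assoc]
      · rw [if_neg h2, if_neg (by omega), twa, if_neg hm]

theorem truncateBLoop_eq (older : List String) (max_chars acc : Int) (kept : List String) :
    truncateBLoop older max_chars acc kept = kept ++ twa older max_chars acc := by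
  induction older generalizing acc kept with
  | nil => simp [truncateBLoop, twa]
  | cons m rest ih =>
    rw [truncateBLoop, twa]
    by_cases h : acc + PySem.Str.len m > max_chars
    · rw [if_pos h, if_pos h]
      simp
    · rw [if_neg h, if_neg h, ih]
      simp

theorem alt_unfold (l : List String) (mc : Int) (n : String) (o : List String)
    (h : l.reverse = n :: o) :
    truncate_to_limit_py_alt l mc = (truncateBLoop o mc (PySem.Str.len n) [n]).reverse := by
  rw [truncate_to_limit_py_alt, h]

-- B equals the reference function on nonempty lists
theorem alt_eq_sFit (l : List String) (max_chars : Int) (hne : l ≠ []) :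
    truncate_to_limit_py_alt l max_chars = sFit l max_chars := by
  induction l with
  | nil => exact absurd rfl hne
  | cons m rest ih =>
    cases hre : rest with
    | nil =>
      simp [truncate_to_limit_py_alt, truncateBLoop_eq, twa, sFit]
    | cons r rs =>
      rw [← hre]
      have hrne : rest ≠ [] := by simp [hre]
      -- rest.reverse = n :: o with n the newest message of rest
      obtain ⟨n, o, hno⟩ : ∃ n o, rest.reverse = n :: o := by
        cases hrv : rest.reverse with
        | nil => exact absurd (by simpa using congrArg List.reverse hrv) hrne
        | cons n o => exact ⟨n, o, rfl⟩
      have hrest : rest = o.reverse ++ [n] := by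
        have := congrArg List.reverse hno
        simpa using this
      have hsum_rest : sumLen rest = PySem.Str.len n + sumLen o := by
        rw [← sumLen_reverse rest, hno, sumLen_cons]
      have hmrev : (m :: rest).reverse = n :: (o ++ [m]) := by
        rw [List.reverse_cons, hno]; rfl
      rw [alt_unfold (m :: rest) max_chars n (o ++ [m]) hmrev]
      rw [truncateBLoop_eq, twa_append]
      rw [sFit, if_neg hrne]
      by_cases h1 : PySem.Str.len n + sumLen o ≤ max_chars
      · rw [if_pos h1]
        by_cases h2 : sumLen (m :: rest) ≤ max_chars
        · -- everything fits
          rw [if_pos h2]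
          rw [sumLen_cons, hsum_rest] at h2
          rw [twa, twa, if_neg (by omega)]
          rw [hrest]
          simp
        · rw [if_neg h2]
          rw [sumLen_cons, hsum_rest] at h2
          rw [twa, if_pos (by omega)]
          -- B keeps exactly rest; show sFit rest = rest
          have hB : truncate_to_limit_py_alt rest max_chars = rest := by
            rw [alt_unfold rest max_chars n o hno, truncateBLoop_eq,
              twa_all o max_chars _ (by omega)]
            rw [hrest]
            simp
          rw [← ih hrne, hB, hrest]
          simp
      · rw [if_neg h1]
        have hm0 := strLen_nonneg m
        rw [if_neg (show ¬ sumLen (m :: rest) ≤ max_chars by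
          rw [sumLen_cons, hsum_rest]; omega)]
        rw [← ih hrne, alt_unfold rest max_chars n o hno, truncateBLoop_eq]

-- A's loop computes the reference function on the dropped suffix
theorem aLoop_eq (messages : List String) (max_chars : Int) :
    ∀ (k i : Nat), k = messages.length - 1 - i → i < messages.length →
    (messages.drop (truncateALoop messages max_chars i (sumLen (messages.drop i)))) =
      sFit (messages.drop i) max_chars := by
  intro k
  induction k with
  | zero =>
    intro i hk hi
    -- i = length - 1: the loop guard fails, drop i = [last]
    have hieq : i = messages.length - 1 := by omega
    rw [truncateALoop, if_neg (by omega)]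
    obtain ⟨x, hx⟩ : ∃ x, messages.drop i = [x] := by
      have hlen : (messages.drop i).length = 1 := by
        rw [List.length_drop]; omega
      cases hd : messages.drop i with
      | nil => simp [hd] at hlen
      | cons a t =>
        rw [hd] at hlen; simp at hlen
        exact ⟨a, by rw [hlen]⟩
    rw [hx, sFit]
    simp
  | succ k ih =>
    intro i hk hi
    have hlt : i < messages.length - 1 := by omega
    rw [truncateALoop]
    by_cases ht : sumLen (messages.drop i) > max_chars
    · rw [if_pos ⟨hlt, ht⟩]
      -- drop i = messages[i] :: drop (i+1)
      have hgd : messages.getD i "" = messages[i]'hi := by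
        simp [List.getD_eq_getElem?_getD, List.getElem?_eq_getElem hi]
      have hdrop : messages.drop i = messages[i]'hi :: messages.drop (i + 1) := by
        exact List.drop_eq_getElem_cons hi
      have hsum : sumLen (messages.drop i) - PySem.Str.len (messages.getD i "") =
          sumLen (messages.drop (i + 1)) := by
        rw [hgd, hdrop, sumLen_cons]; ring
      rw [hsum]
      rw [ih (i + 1) (by omega) (by omega)]
      -- sFit (drop i) = sFit (drop (i+1)) since total too big and tail nonempty
      rw [hdrop, sFit]
      have htne : messages.drop (i + 1) ≠ [] := by
        have : (messages.drop (i + 1)).length > 0 := by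
          rw [List.length_drop]; omega
        exact List.ne_nil_of_length_pos this
      rw [if_neg htne, if_neg (by rw [← hdrop]; omega)]
    · rw [if_neg (by omega)]
      -- loop stops: the whole suffix fits
      have hdrop : messages.drop i = messages[i]'hi :: messages.drop (i + 1) := by
        exact List.drop_eq_getElem_cons hi
      have htne : messages.drop (i + 1) ≠ [] := by
        have : (messages.drop (i + 1)).length > 0 := by
          rw [List.length_drop]; omega
        exact List.ne_nil_of_length_pos this
      rw [hdrop, sFit, if_neg htne, if_pos (by rw [← hdrop]; omega)]

-- A equals the reference function
theorem a_eq_sFit (messages : List String) (max_chars : Int) :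
    truncate_to_limit_py messages max_chars = sFit messages max_chars := by
  cases messages with
  | nil => simp [truncate_to_limit_py, sFit]
  | cons m rest =>
    rw [truncate_to_limit_py, if_neg (by simp)]
    by_cases h : ((m :: rest).map PySem.Str.len).sum ≤ max_chars
    · rw [if_pos h]
      -- the whole list already fits
      have hs : sumLen (m :: rest) ≤ max_chars := h
      cases hre : rest with
      | nil => simp [sFit]
      | cons r rs =>
        rw [← hre, sFit, if_neg (by simp [hre]), if_pos hs]
    · rw [if_neg h]
      have := aLoop_eq (m :: rest) max_chars ((m :: rest).length - 1 - 0) 0 rfl (by simp)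
      simpa [sumLen] using this

-- ===== VERDICT (by name: the statement is the Claim_ definition above) =====
theorem truncate_to_limit_py_spec : Claim_equal_truncate_to_limit_py := by
  intro messages max_chars _
  show truncate_to_limit_py messages max_chars = truncate_to_limit_py_alt messages max_chars
  cases hm : messages with
  | nil => simp [truncate_to_limit_py, truncate_to_limit_py_alt]
  | cons m rest =>
    rw [a_eq_sFit, alt_eq_sFit _ _ (by simp)]
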